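-- pv_equiv track=rewrite | github.com/mnur53/code_jam | 2018/Qualification/2_trouble_sort/trouble_sort_2.py | is_trouble_sort_valid
-- ===== SOURCE A (Python) =====
-- def get_min(arr):
--     this_min = arr[0]
--     del arr[0]
--     return this_min, arr
--
-- def is_trouble_sort_valid(arr):
--
--     geraden = arr[0::2]
--     ungeraden = arr[1::2]
--
--     geraden.sort()
--     ungeraden.sort()
--
--     last_min, geraden = get_min(geraden)
--     index = 1
--
--     while len(geraden) > 0 or len(ungeraden) > 0:
--
--         if index % 2 == 0:
--             this_min, geraden = get_min(geraden)
--         else: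
--             this_min, ungeraden = get_min(ungeraden)
--
--         if this_min >= last_min:
--             last_min = this_min
--             pass
--         else:
--             return str(index-1)
--
--         index += 1
--
--     return "OK"
-- ===== SOURCE B (Python) =====
-- def is_trouble_sort_valid(arr):
--     g = sorted(arr[0::2])
--     u = sorted(arr[1::2])
--     merged = [g[i // 2] if i % 2 == 0 else u[i // 2] for i in range(len(arr))]
--     for i in range(len(arr) - 1):
--         if merged[i + 1] < merged[i]:
--             return str(i)
--     return "OK"
-- ===== Notes on version B (the rewrite author's own statement) =====
-- stated objective: faster
-- what changed: B builds the interleaved merged list once by index arithmetic over the two sorted halves and scans adjacent pairs, instead of A's loop that repeatedly pops the front of the lists with del arr[0] (a quadratic shift) while tracking a last_min accumulator.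
import Mathlib
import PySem

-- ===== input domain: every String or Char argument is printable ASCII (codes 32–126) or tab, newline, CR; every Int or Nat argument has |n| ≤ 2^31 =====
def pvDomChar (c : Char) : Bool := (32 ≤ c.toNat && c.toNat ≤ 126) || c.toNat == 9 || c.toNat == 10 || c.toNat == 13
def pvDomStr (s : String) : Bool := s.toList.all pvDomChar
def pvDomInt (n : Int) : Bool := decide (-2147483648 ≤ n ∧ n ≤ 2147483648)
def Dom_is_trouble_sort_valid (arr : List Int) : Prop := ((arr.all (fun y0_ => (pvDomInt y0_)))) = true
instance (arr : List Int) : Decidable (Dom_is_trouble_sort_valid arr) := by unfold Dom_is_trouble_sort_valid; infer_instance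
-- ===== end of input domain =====

-- B builds the interleaved merged list once and scans adjacent pairs, instead of A's loop that
-- repeatedly pops the front of the sorted halves with del arr[0]; equivalence is about the RETURN
-- value (A mutates only lists it creates internally, never its argument).

-- ===== PORT A =====

-- get_min(arr): this_min = arr[0] (IndexError on [] → none); del arr[0] → tail
def get_min (arr : List Int) : Option (Int × List Int) :=
  match PySem.List.pyGet? arr 0 with
  | none => none
  | some m => some (m, arr.tail)

-- needed by aLoop's termination proof
theorem get_min_length {arr : List Int} {m : Int} {rest : List Int}
    (h : get_min arr = some (m, rest)) : rest.length + 1 = arr.length := by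
  cases arr with
  | nil => simp [get_min, PySem.List.pyGet?] at h
  | cons a t =>
      simp only [get_min, PySem.List.pyGet?_zero_cons] at h
      cases h
      simp_all

-- the while loop of A; state (last_min, geraden, ungeraden, index).
-- In the 'none' branches Python raises IndexError (unreachable under Pre_): we return "".
def aLoop (last : Int) (g u : List Int) (idx : Nat) : String :=
  if g.length > 0 ∨ u.length > 0 then
    if idx % 2 = 0 then
      match h : get_min g with
      | none => ""
      | some (m, g') =>
        if m ≥ last then aLoop m g' u (idx + 1) else PySem.Int.toStr ((idx : Int) - 1)
    else
      match h : get_min u with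
      | none => ""
      | some (m, u') =>
        if m ≥ last then aLoop m g u' (idx + 1) else PySem.Int.toStr ((idx : Int) - 1)
  else "OK"
termination_by g.length + u.length
decreasing_by
  · have := get_min_length h; omega
  · have := get_min_length h; omega

def is_trouble_sort_valid (arr : List Int) : String :=
  let geraden0 := (PySem.List.slice? arr (some 0) none 2).getD []    -- arr[0::2]; step 2 ≠ 0, never none
  let ungeraden0 := (PySem.List.slice? arr (some 1) none 2).getD []  -- arr[1::2]
  let geraden1 := PySem.List.sorted geraden0 id false
  let ungeraden := PySem.List.sorted ungeraden0 id false
  match get_min geraden1 with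
  | none => ""   -- IndexError (only when arr = []): excluded by Pre_
  | some p => aLoop p.1 p.2 ungeraden 1

-- ===== PORT B =====

-- the 'for i in range(len(arr)-1)' scan with early return
def bLoop (merged : List Int) : List Int → String
  | [] => "OK"
  | i :: rest =>
      if PySem.List.pyGetD merged (i + 1) 0 < PySem.List.pyGetD merged i 0
      then PySem.Int.toStr i
      else bLoop merged rest

def is_trouble_sort_valid_alt (arr : List Int) : String :=
  let g := PySem.List.sorted ((PySem.List.slice? arr (some 0) none 2).getD []) id false
  let u := PySem.List.sorted ((PySem.List.slice? arr (some 1) none 2).getD []) id false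
  let merged := (PySem.List.pyRange 0 (arr.length : Int) 1).map (fun i =>
    if PySem.Int.mod i 2 = 0 then PySem.List.pyGetD g (PySem.Int.floordiv i 2) 0
    else PySem.List.pyGetD u (PySem.Int.floordiv i 2) 0)
  bLoop merged (PySem.List.pyRange 0 ((arr.length : Int) - 1) 1)

-- ===== PRECONDITION & SPEC =====
-- Pre_ excludes only the empty list, on which A raises IndexError.
def Pre_is_trouble_sort_valid (arr : List Int) : Prop := arr ≠ []
instance (arr : List Int) : Decidable (Pre_is_trouble_sort_valid arr) := by unfold Pre_is_trouble_sort_valid; infer_instance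
def pvWitness_is_trouble_sort_valid : List Int := [3, 1, 2]

def Spec_is_trouble_sort_valid (arr : List Int) (out : String) : Prop := out = is_trouble_sort_valid_alt arr
instance (arr : List Int) (out : String) : Decidable (Spec_is_trouble_sort_valid arr out) := by unfold Spec_is_trouble_sort_valid; infer_instance

-- ===== CLAIM (what is proved, stated in full; the proofs are below) =====
def Claim_equal_is_trouble_sort_valid : Prop := ∀ (arr : List Int), Dom_is_trouble_sort_valid arr → Pre_is_trouble_sort_valid arr → Spec_is_trouble_sort_valid arr (is_trouble_sort_valid arr)

-- ===== LEMMAS AND PROOFS =====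

-- every other element, starting with the first (the value of arr[0::2])
def evens : List Int → List Int
  | [] => []
  | [x] => [x]
  | x :: _ :: t => x :: evens t

-- the interleaving a0,b0,a1,b1,… of two lists
def ilv : List Int → List Int → List Int
  | [], ys => ys
  | x :: xs, ys => x :: ilv ys xs
termination_by xs ys => xs.length + ys.length

-- the common scan: walk the merged list with its predecessor, report the first drop
def scan : Int → List Int → Nat → String
  | _, [], _ => "OK"
  | last, x :: xs, idx =>
      if x ≥ last then scan x xs (idx + 1) else PySem.Int.toStr ((idx : Int) - 1)

theorem ilv_nil (ys : List Int) : ilv [] ys = ys := by rw [ilv]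

theorem ilv_cons (x : Int) (xs ys : List Int) : ilv (x :: xs) ys = x :: ilv ys xs := by rw [ilv]

theorem length_evens (xs : List Int) : (evens xs).length = (xs.length + 1) / 2 := by
  induction xs using evens.induct with
  | case1 => simp [evens]
  | case2 x => simp [evens]
  | case3 x y t ih => simp [evens, ih]; omega

theorem length_ilv (a b : List Int) : (ilv a b).length = a.length + b.length := by
  induction a, b using ilv.induct with
  | case1 ys => simp [ilv_nil]
  | case2 x xs ys ih => simp [ilv_cons, ih]; omega

theorem filt_evens (xs : List Int) :
    (List.range ((xs.length + 1) / 2)).filterMap (fun k => xs[2 * k]?) = evens xs := by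
  induction xs using evens.induct with
  | case1 => simp [evens]
  | case2 x => simp [evens, List.range_succ]
  | case3 x y t ih =>
      have hc : ((x :: y :: t).length + 1) / 2 = (t.length + 1) / 2 + 1 := by simp; omega
      rw [hc, List.range_succ_eq_map, List.filterMap_cons]
      have hfun : ((fun k => (x :: y :: t)[2 * k]?) ∘ Nat.succ) = fun k => t[2 * k]? := by
        funext k
        simp [Function.comp, show 2 * (k + 1) = 2 * k + 1 + 1 by ring, List.getElem?_cons_succ]
      simp only [List.filterMap_map, hfun, ih]
      simp [evens]

theorem slice_evens (xs : List Int) :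
    PySem.List.slice? xs (some 0) none 2 = some (evens xs) := by
  cases xs with
  | nil => decide
  | cons a t =>
      unfold PySem.List.slice? PySem.List.sliceIndices
      simp only [if_neg (by norm_num : ¬ (2:Int) = 0), if_neg (by norm_num : ¬ (2:Int) < 0),
        if_neg (by norm_num : ¬ (0:Int) < 0), if_pos (by norm_num : (0:Int) < 2)]
      rw [min_eq_left (by positivity)]
      rw [if_pos (by exact_mod_cast Nat.succ_pos t.length : (0:Int) < ((a :: t).length : Int))]
      have hcnt : ((((a :: t).length : Int) - 0 + 2 - 1) / 2).toNat = ((a :: t).length + 1) / 2 := by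
        omega
      rw [hcnt]
      have hf : (fun k : Nat => (a :: t)[((0:Int) + 2 * (k : Int)).toNat]?)
          = fun k => (a :: t)[2 * k]? := by
        funext k; congr 1; omega
      rw [hf, filt_evens]

theorem slice_odds (xs : List Int) :
    PySem.List.slice? xs (some 1) none 2 = some (evens xs.tail) := by
  cases xs with
  | nil => decide
  | cons a t =>
      unfold PySem.List.slice? PySem.List.sliceIndices
      simp only [if_neg (by norm_num : ¬ (2:Int) = 0), if_neg (by norm_num : ¬ (2:Int) < 0),
        if_neg (by norm_num : ¬ (1:Int) < 0), if_pos (by norm_num : (0:Int) < 2)]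
      rw [min_eq_left (by exact_mod_cast Nat.succ_le_of_lt (Nat.succ_pos t.length) : (1:Int) ≤ ((a :: t).length : Int))]
      have hcnt : (if (1:Int) < ((a :: t).length : Int)
          then ((((a :: t).length : Int) - 1 + 2 - 1) / 2).toNat else 0) = (t.length + 1) / 2 := by
        simp only [List.length_cons]
        split_ifs with h
        · push_cast at h; omega
        · push_cast at h; omega
      rw [hcnt]
      have hf : (fun k : Nat => (a :: t)[((1:Int) + 2 * (k : Int)).toNat]?)
          = fun k => t[2 * k]? := by
        funext k
        rw [show ((1:Int) + 2 * (k : Int)).toNat = 2 * k + 1 by omega,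
          List.getElem?_cons_succ]
      rw [hf, filt_evens]
      rfl

theorem aLoop_eq (n : Nat) : ∀ (g u : List Int) (last : Int) (idx : Nat),
    g.length + u.length = n →
    ((idx % 2 = 1 → (u.length = g.length ∨ u.length = g.length + 1) →
        aLoop last g u idx = scan last (ilv u g) idx) ∧
     (idx % 2 = 0 → (g.length = u.length ∨ g.length = u.length + 1) →
        aLoop last g u idx = scan last (ilv g u) idx)) := by
  induction n using Nat.strong_induction_on with
  | _ n IH =>
    intro g u last idx hn
    constructor
    · intro hp hlen
      cases u with
      | nil =>
          have hg : g = [] := by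
            cases g with
            | nil => rfl
            | cons a b => simp at hlen
          subst hg
          rw [aLoop]
          simp [ilv_nil, scan]
      | cons x u' =>
          rw [aLoop]
          rw [if_pos (by simp : g.length > 0 ∨ (x :: u').length > 0)]
          rw [if_neg (by omega : ¬ idx % 2 = 0)]
          have hgm : get_min (x :: u') = some (x, u') := by
            simp [get_min]
          split
          · rename_i heq
            rw [hgm] at heq
            simp at heq
          rename_i m v heq
          rw [hgm] at heq
          simp only [Option.some.injEq, Prod.mk.injEq] at heq
          obtain ⟨rfl, rfl⟩ := heq
          rw [ilv_cons, scan]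
          by_cases hxl : x ≥ last
          · rw [if_pos hxl, if_pos hxl]
            exact (IH (g.length + u'.length) (by simp at hn; omega) g u' x (idx + 1) rfl).2
              (by omega) (by simp at hlen; omega)
          · rw [if_neg hxl, if_neg hxl]
    · intro hp hlen
      cases g with
      | nil =>
          have hu : u = [] := by
            cases u with
            | nil => rfl
            | cons a b => simp at hlen
          subst hu
          rw [aLoop]
          simp [ilv_nil, scan]
      | cons x g' =>
          rw [aLoop]
          rw [if_pos (by simp : (x :: g').length > 0 ∨ u.length > 0)]
          rw [if_pos hp]
          have hgm : get_min (x :: g') = some (x, g') := by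
            simp [get_min]
          split
          · rename_i heq
            rw [hgm] at heq
            simp at heq
          rename_i m v heq
          rw [hgm] at heq
          simp only [Option.some.injEq, Prod.mk.injEq] at heq
          obtain ⟨rfl, rfl⟩ := heq
          rw [ilv_cons, scan]
          by_cases hxl : x ≥ last
          · rw [if_pos hxl, if_pos hxl]
            exact (IH (g'.length + u.length) (by simp at hn; omega) g' u x (idx + 1) rfl).1
              (by omega) (by simp at hlen; omega)
          · rw [if_neg hxl, if_neg hxl]

theorem ilv_map (n : Nat) : ∀ (g u : List Int), g.length + u.length = n →
    (g.length = u.length ∨ g.length = u.length + 1) →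
    (List.range (g.length + u.length)).map
      (fun j => if j % 2 = 0 then g.getD (j / 2) 0 else u.getD (j / 2) 0) = ilv g u := by
  induction n using Nat.strong_induction_on with
  | _ n IH =>
    intro g u hn hlen
    cases g with
    | nil =>
        have hu : u = [] := by
          cases u with
          | nil => rfl
          | cons a b => simp at hlen
        subst hu
        simp [ilv_nil]
    | cons x g' =>
        have h1 : (x :: g').length + u.length = (u.length + g'.length) + 1 := by simp; omega
        have hfun : ∀ j : Nat,
            (if (j + 1) % 2 = 0 then (x :: g').getD ((j + 1) / 2) 0 else u.getD ((j + 1) / 2) 0)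
              = if j % 2 = 0 then u.getD (j / 2) 0 else g'.getD (j / 2) 0 := by
          intro j
          by_cases hj : j % 2 = 0
          · have e1 : (j + 1) % 2 = 1 := by omega
            have e2 : (j + 1) / 2 = j / 2 := by omega
            simp [e1, e2, hj]
          · have e1 : (j + 1) % 2 = 0 := by omega
            have e2 : (j + 1) / 2 = j / 2 + 1 := by omega
            simp [e1, e2, hj]
        rw [h1, List.range_succ_eq_map, ilv_cons]
        simp only [List.map_cons, List.map_map, Function.comp_def, Nat.succ_eq_add_one, hfun]
        rw [IH (u.length + g'.length) (by omega) u g' rfl (by simp at hlen; omega)]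
        simp

theorem bLoop_eq (xs : List Int) : ∀ (pre : List Int) (x : Int),
    bLoop (pre ++ x :: xs)
        (PySem.List.pyRange (pre.length : Int) ((pre.length : Int) + (xs.length : Int)) 1)
      = scan x xs (pre.length + 1) := by
  induction xs with
  | nil =>
      intro pre x
      rw [show ((pre.length : Int) + (([] : List Int).length : Int)) = (pre.length : Int) by simp,
        PySem.List.pyRange_one_eq_nil (le_refl _)]
      rfl
  | cons y ys ih =>
      intro pre x
      rw [PySem.List.pyRange_one_cons
        (by push_cast [List.length_cons]; omega : (pre.length : Int) < (pre.length : Int) + ((y :: ys).length : Int))]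
      rw [bLoop]
      have hx : PySem.List.pyGetD (pre ++ x :: y :: ys) (pre.length : Int) 0 = x := by
        rw [PySem.List.pyGetD_natCast]
        simp
      have hy : PySem.List.pyGetD (pre ++ x :: y :: ys) ((pre.length : Int) + 1) 0 = y := by
        rw [show ((pre.length : Int) + 1) = ((pre.length + 1 : Nat) : Int) by push_cast; ring,
          PySem.List.pyGetD_natCast]
        simp
      rw [hx, hy, scan]
      by_cases h : y < x
      · rw [if_pos h, if_neg (by omega : ¬ y ≥ x)]
        congr 1
        push_cast; ring
      · rw [if_neg h, if_pos (by omega : y ≥ x)]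
        have := ih (pre ++ [x]) y
        rw [show pre ++ x :: y :: ys = (pre ++ [x]) ++ y :: ys by simp] at *
        rw [show ((pre.length : Int) + 1) = (((pre ++ [x]).length : Nat) : Int) by simp,
          show ((pre.length : Int) + ((y :: ys).length : Int))
              = (((pre ++ [x]).length : Nat) : Int) + ((ys.length : Nat) : Int) by
            simp; ring]
        rw [this]
        simp

theorem is_trouble_sort_valid_spec : Claim_equal_is_trouble_sort_valid := by
  intro arr hdom hpre
  unfold Spec_is_trouble_sort_valid
  cases arr with
  | nil => exact absurd rfl hpre
  | cons a t =>
    unfold is_trouble_sort_valid is_trouble_sort_valid_alt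
    rw [slice_evens, slice_odds]
    simp only [Option.getD_some, List.tail_cons]
    rcases hgs : PySem.List.sorted (evens (a :: t)) id false with _ | ⟨x, g'⟩
    · exfalso
      have hl := PySem.List.length_sorted (evens (a :: t)) id false
      rw [hgs, length_evens] at hl
      simp at hl
      omega
    · have hgm : get_min (x :: g') = some (x, g') := by
        simp [get_min]
      -- length bookkeeping
      have hLg : g'.length + 1 = (t.length + 2) / 2 := by
        have hl := PySem.List.length_sorted (evens (a :: t)) id false
        rw [hgs, length_evens] at hl
        simp only [List.length_cons] at hl
        omega
      have hLu : (PySem.List.sorted (evens t) id false).length = (t.length + 1) / 2 := by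
        rw [PySem.List.length_sorted, length_evens]
      set u := PySem.List.sorted (evens t) id false with hu
      -- the A side
      have hA : aLoop x g' u 1 = scan x (ilv u g') 1 :=
        (aLoop_eq (g'.length + u.length) g' u x 1 rfl).1 (by norm_num) (by omega)
      -- the B side: the merged list is the interleaving
      have hmerge : (PySem.List.pyRange 0 (((a :: t).length : Nat) : Int) 1).map (fun i =>
            if PySem.Int.mod i 2 = 0 then PySem.List.pyGetD (x :: g') (PySem.Int.floordiv i 2) 0
            else PySem.List.pyGetD u (PySem.Int.floordiv i 2) 0)
          = ilv (x :: g') u := by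
        rw [PySem.List.pyRange_one]
        simp only [sub_zero, Int.toNat_natCast, List.map_map]
        have hfun : ((fun i =>
              if PySem.Int.mod i 2 = 0 then PySem.List.pyGetD (x :: g') (PySem.Int.floordiv i 2) 0
              else PySem.List.pyGetD u (PySem.Int.floordiv i 2) 0) ∘ fun k : Nat => (0 : Int) + k)
            = fun j : Nat => if j % 2 = 0 then (x :: g').getD (j / 2) 0 else u.getD (j / 2) 0 := by
          funext k
          have hm : PySem.Int.mod ((k : Nat) : Int) 2 = ((k % 2 : Nat) : Int) := by
            exact_mod_cast PySem.Int.mod_natCast k 2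
          have hd : PySem.Int.floordiv ((k : Nat) : Int) 2 = ((k / 2 : Nat) : Int) := by
            exact_mod_cast PySem.Int.floordiv_natCast k 2
          simp only [Function.comp_apply, zero_add]
          rw [hm, hd]
          simp only [PySem.List.pyGetD_natCast, Nat.cast_eq_zero]
        rw [hfun]
        have hlen2 : (a :: t).length = (x :: g').length + u.length := by
          simp at hLg ⊢; omega
        rw [hlen2]
        exact ilv_map ((x :: g').length + u.length) (x :: g') u rfl (by simp; omega)
      rw [hmerge, ilv_cons]
      -- the B scan
      have hB := bLoop_eq (ilv u g') [] x
      simp only [List.nil_append, List.length_nil, Nat.cast_zero, zero_add] at hB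
      rw [show (((a :: t).length : Int) - 1) = ((ilv u g').length : Int) by
        rw [length_ilv]; push_cast [List.length_cons]; omega]
      rw [hB]
      split
      · rename_i heq
        rw [hgm] at heq
        simp at heq
      rename_i p heq
      rw [hgm] at heq
      simp only [Option.some.injEq] at heq
      subst heq
      exact hA
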